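-- pv_equiv track=rewrite | github.com/fennq/diverg | skills/web_vulns/web_vulns.py | _severity_for_path
-- ===== SOURCE A (Python) =====
-- def _severity_for_path(path: str) -> tuple[str, str, str]:
--     """Return (severity, impact, remediation) based on what was found."""
--     p = path.lower()
--     if any(x in p for x in (".env", "credentials", "wp-config", "config.php", "config.json", "config.yml",
--                              "application.properties", "application.yml")):
--         return (
--             "Critical",
--             "Exposed configuration file may contain database credentials, API keys, or secrets.",
--             "Remove or restrict access to configuration files. Never store secrets in web-accessible directories.",
--         )
--     if any(x in p for x in (".git", ".svn", ".idea", ".vscode")):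
--         return (
--             "High",
--             "Source control metadata exposure could leak full source code and commit history.",
--             "Block access to VCS directories via web server configuration (e.g., deny .git in nginx/apache).",
--         )
--     if any(x in p for x in ("backup", "dump", "database", ".sql")):
--         return (
--             "Critical",
--             "Database dump exposure could leak all application data including user credentials.",
--             "Remove database dumps from web-accessible directories. Use secure off-site backups.",
--         )
--     if any(x in p for x in ("phpinfo", "server-status", "server-info", "elmah", "trace.axd")):
--         return (
--             "Medium",
--             "Server diagnostic pages expose internal configuration, software versions, and environment details.",
--             "Disable or restrict access to diagnostic/info endpoints in production.",
--         )
--     if any(x in p for x in (".log", "debug", "error", "access.log")):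
--         return (
--             "Medium",
--             "Log file exposure may reveal internal paths, errors, IP addresses, and application behavior.",
--             "Move log files outside the web root. Restrict access via server configuration.",
--         )
--     return (
--         "Low",
--         "Sensitive file exposure provides reconnaissance information to attackers.",
--         "Review and restrict access to unnecessary files in the web root.",
--     )
-- ===== SOURCE B (Python) =====
-- # One-pass minimum-rank scan over a flat keyword table instead of an if-cascade:
-- # every keyword carries the index of its severity group; we take the smallest
-- # index of any matching keyword (no early return), then look the result up.
--
-- _FLAT = [
--     (".env", 0), ("credentials", 0), ("wp-config", 0), ("config.php", 0),
--     ("config.json", 0), ("config.yml", 0), ("application.properties", 0),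
--     ("application.yml", 0),
--     (".git", 1), (".svn", 1), (".idea", 1), (".vscode", 1),
--     ("backup", 2), ("dump", 2), ("database", 2), (".sql", 2),
--     ("phpinfo", 3), ("server-status", 3), ("server-info", 3), ("elmah", 3),
--     ("trace.axd", 3),
--     (".log", 4), ("debug", 4), ("error", 4), ("access.log", 4),
-- ]
--
-- _RESULTS = [
--     ("Critical",
--      "Exposed configuration file may contain database credentials, API keys, or secrets.",
--      "Remove or restrict access to configuration files. Never store secrets in web-accessible directories."),
--     ("High",
--      "Source control metadata exposure could leak full source code and commit history.",
--      "Block access to VCS directories via web server configuration (e.g., deny .git in nginx/apache)."),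
--     ("Critical",
--      "Database dump exposure could leak all application data including user credentials.",
--      "Remove database dumps from web-accessible directories. Use secure off-site backups."),
--     ("Medium",
--      "Server diagnostic pages expose internal configuration, software versions, and environment details.",
--      "Disable or restrict access to diagnostic/info endpoints in production."),
--     ("Medium",
--      "Log file exposure may reveal internal paths, errors, IP addresses, and application behavior.",
--      "Move log files outside the web root. Restrict access via server configuration."),
--     ("Low",
--      "Sensitive file exposure provides reconnaissance information to attackers.",
--      "Review and restrict access to unnecessary files in the web root."),
-- ]
--
--
-- def _severity_for_path(path: str) -> tuple[str, str, str]: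
--     """Return (severity, impact, remediation) based on what was found."""
--     p = path.lower()
--     best = 5
--     for keyword, rank in _FLAT:
--         if rank < best and keyword in p:
--             best = rank
--     return _RESULTS[best]
-- ===== Notes on version B (the rewrite author's own statement) =====
-- stated objective: alternative
-- what changed: Replaces the first-match if-cascade over keyword groups by a single exhaustive pass over a flat (keyword, rank) table that accumulates the minimum matching rank and then indexes a results table with it.
import Mathlib
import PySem

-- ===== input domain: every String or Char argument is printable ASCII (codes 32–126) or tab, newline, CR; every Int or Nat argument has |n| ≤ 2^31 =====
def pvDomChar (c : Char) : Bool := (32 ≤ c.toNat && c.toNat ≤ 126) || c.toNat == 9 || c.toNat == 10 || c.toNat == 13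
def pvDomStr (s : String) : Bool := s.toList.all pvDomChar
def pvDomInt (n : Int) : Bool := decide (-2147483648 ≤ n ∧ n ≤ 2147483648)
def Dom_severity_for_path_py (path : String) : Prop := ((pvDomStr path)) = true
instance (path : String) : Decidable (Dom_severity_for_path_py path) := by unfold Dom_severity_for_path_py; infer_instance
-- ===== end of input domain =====

-- B replaces A's first-match if-cascade by one exhaustive minimum-rank pass over a flat
-- (keyword, rank) table followed by a table lookup (objective: alternative); same results.

-- ===== PORT A =====
-- literal transliteration of the if-cascade: p = path.lower(); five 'any(x in p for x in (...))' branches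
def severity_for_path_py (path : String) : String × String × String :=
  let p := PySem.Str.lower path
  if ([".env", "credentials", "wp-config", "config.php", "config.json", "config.yml",
       "application.properties", "application.yml"].any (fun x => PySem.Str.isIn x p)) then
    ("Critical",
     "Exposed configuration file may contain database credentials, API keys, or secrets.",
     "Remove or restrict access to configuration files. Never store secrets in web-accessible directories.")
  else if ([".git", ".svn", ".idea", ".vscode"].any (fun x => PySem.Str.isIn x p)) then
    ("High",
     "Source control metadata exposure could leak full source code and commit history.",
     "Block access to VCS directories via web server configuration (e.g., deny .git in nginx/apache).")
  else if (["backup", "dump", "database", ".sql"].any (fun x => PySem.Str.isIn x p)) then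
    ("Critical",
     "Database dump exposure could leak all application data including user credentials.",
     "Remove database dumps from web-accessible directories. Use secure off-site backups.")
  else if (["phpinfo", "server-status", "server-info", "elmah", "trace.axd"].any (fun x => PySem.Str.isIn x p)) then
    ("Medium",
     "Server diagnostic pages expose internal configuration, software versions, and environment details.",
     "Disable or restrict access to diagnostic/info endpoints in production.")
  else if ([".log", "debug", "error", "access.log"].any (fun x => PySem.Str.isIn x p)) then
    ("Medium",
     "Log file exposure may reveal internal paths, errors, IP addresses, and application behavior.",
     "Move log files outside the web root. Restrict access via server configuration.")
  else
    ("Low",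
     "Sensitive file exposure provides reconnaissance information to attackers.",
     "Review and restrict access to unnecessary files in the web root.")

-- ===== PORT B =====
-- Source B's flat (keyword, rank) table _FLAT
def pvFlat : List (String × Nat) :=
  [(".env", 0), ("credentials", 0), ("wp-config", 0), ("config.php", 0),
   ("config.json", 0), ("config.yml", 0), ("application.properties", 0),
   ("application.yml", 0),
   (".git", 1), (".svn", 1), (".idea", 1), (".vscode", 1),
   ("backup", 2), ("dump", 2), ("database", 2), (".sql", 2),
   ("phpinfo", 3), ("server-status", 3), ("server-info", 3), ("elmah", 3),
   ("trace.axd", 3),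
   (".log", 4), ("debug", 4), ("error", 4), ("access.log", 4)]

-- Source B's results table _RESULTS (index = rank, 5 = default)
def pvResults : List (String × String × String) :=
  [("Critical",
    "Exposed configuration file may contain database credentials, API keys, or secrets.",
    "Remove or restrict access to configuration files. Never store secrets in web-accessible directories."),
   ("High",
    "Source control metadata exposure could leak full source code and commit history.",
    "Block access to VCS directories via web server configuration (e.g., deny .git in nginx/apache)."),
   ("Critical",
    "Database dump exposure could leak all application data including user credentials.",
    "Remove database dumps from web-accessible directories. Use secure off-site backups."),
   ("Medium",
    "Server diagnostic pages expose internal configuration, software versions, and environment details.",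
    "Disable or restrict access to diagnostic/info endpoints in production."),
   ("Medium",
    "Log file exposure may reveal internal paths, errors, IP addresses, and application behavior.",
    "Move log files outside the web root. Restrict access via server configuration."),
   ("Low",
    "Sensitive file exposure provides reconnaissance information to attackers.",
    "Review and restrict access to unnecessary files in the web root.")]

-- Source B's loop 'for keyword, rank in _FLAT: if rank < best and keyword in p: best = rank'
def pvStep (p : String) (best : Nat) (kr : String × Nat) : Nat :=
  if kr.2 < best ∧ PySem.Str.isIn kr.1 p then kr.2 else best

def severity_for_path_py_alt (path : String) : String × String × String :=
  let p := PySem.Str.lower path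
  let best := pvFlat.foldl (pvStep p) 5
  -- 'return _RESULTS[best]'; best < 6 = len(_RESULTS) always, so plain in-range indexing
  pvResults.getD best ("", "", "")

-- ===== PRECONDITION & SPEC =====
def Spec_severity_for_path_py (path : String) (out : String × String × String) : Prop := out = severity_for_path_py_alt path
instance (path : String) (out : String × String × String) : Decidable (Spec_severity_for_path_py path out) := by unfold Spec_severity_for_path_py; infer_instance

-- ===== CLAIM =====
def Claim_equal_severity_for_path_py : Prop := ∀ (path : String), Dom_severity_for_path_py path → Spec_severity_for_path_py path (severity_for_path_py path)

-- ===== LEMMAS AND PROOFS =====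

-- Bool/Nat skeleton of one step of the accumulator against the disjunction on the right
theorem pvStep_aux (c q : Bool) (r b : Nat) :
    (if (r < if r < b ∧ c = true then r else b) ∧ q = true then r
     else if r < b ∧ c = true then r else b) =
      if r < b ∧ (c || q) = true then r else b := by
  cases c <;> cases q <;> by_cases h : r < b <;> simp [h]

-- folding pvStep over one group of keywords that all carry rank r
theorem pvFold_group (p : String) (r b : Nat) (kws : List String) :
    (kws.map (fun k => (k, r))).foldl (pvStep p) b =
      if r < b ∧ kws.any (fun x => PySem.Str.isIn x p) then r else b := by
  induction kws generalizing b with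
  | nil =>
    simp [List.foldl_nil]
  | cons k ks ih =>
    simp only [List.map_cons, List.foldl_cons, List.any_cons]
    rw [ih]
    simp only [pvStep]
    exact pvStep_aux (PySem.Str.isIn k p) (ks.any fun x => PySem.Str.isIn x p) r b

theorem pvFlat_groups :
    pvFlat = ([".env", "credentials", "wp-config", "config.php", "config.json", "config.yml",
               "application.properties", "application.yml"].map (fun k => (k, 0)))
          ++ ([".git", ".svn", ".idea", ".vscode"].map (fun k => (k, 1)))
          ++ (["backup", "dump", "database", ".sql"].map (fun k => (k, 2)))
          ++ (["phpinfo", "server-status", "server-info", "elmah", "trace.axd"].map (fun k => (k, 3)))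
          ++ ([".log", "debug", "error", "access.log"].map (fun k => (k, 4))) := by
  rfl

-- ===== VERDICT =====
theorem severity_for_path_py_spec : Claim_equal_severity_for_path_py := by
  intro path _
  unfold Spec_severity_for_path_py severity_for_path_py severity_for_path_py_alt
  rw [pvFlat_groups]
  simp only [List.foldl_append, pvFold_group]
  cases h0 : ([".env", "credentials", "wp-config", "config.php", "config.json", "config.yml",
       "application.properties", "application.yml"].any (fun x => PySem.Str.isIn x (PySem.Str.lower path))) <;>
  cases h1 : ([".git", ".svn", ".idea", ".vscode"].any (fun x => PySem.Str.isIn x (PySem.Str.lower path))) <;>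
  cases h2 : (["backup", "dump", "database", ".sql"].any (fun x => PySem.Str.isIn x (PySem.Str.lower path))) <;>
  cases h3 : (["phpinfo", "server-status", "server-info", "elmah", "trace.axd"].any (fun x => PySem.Str.isIn x (PySem.Str.lower path))) <;>
  cases h4 : ([".log", "debug", "error", "access.log"].any (fun x => PySem.Str.isIn x (PySem.Str.lower path))) <;>
    (try simp only [h0, h1, h2, h3, h4]) <;> rfl
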